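-- pv_equiv track=rewrite | github.com/allamurodxakimov/list_search | find11_min_odd.py | find_min_odd
-- ===== SOURCE A (Python) =====
-- def find_min_odd(data):
--     """
--     Given the list of numbers, Find the minimum odd number in the list
--     args:
--         data: list of numbers
--     returns: minimum odd number in the list
--     """
--     c=0
--     ls=[]
--     while c<len(data):
--         if data[c]%2==1:
--             ls.append(data[c])
--         c+=1
--     a=0
--     mi=ls[0]
--     while a<len(ls):
--         if mi>=ls[a]:
--             mi=ls[a]
--         a+=1
--     return mi
-- ===== SOURCE B (Python) =====
-- def find_min_odd(data):
--     odds = [x for x in data if x % 2 == 1]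
--     return sorted(odds)[0]
-- ===== Notes on version B (the rewrite author's own statement) =====
-- stated objective: idiomatic
-- what changed: Replaces A's two index-driven while loops (manual filter-by-append, then a running-minimum scan) with a comprehension that filters the odds and sorted(odds)[0] to pick the minimum.
import Mathlib
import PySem

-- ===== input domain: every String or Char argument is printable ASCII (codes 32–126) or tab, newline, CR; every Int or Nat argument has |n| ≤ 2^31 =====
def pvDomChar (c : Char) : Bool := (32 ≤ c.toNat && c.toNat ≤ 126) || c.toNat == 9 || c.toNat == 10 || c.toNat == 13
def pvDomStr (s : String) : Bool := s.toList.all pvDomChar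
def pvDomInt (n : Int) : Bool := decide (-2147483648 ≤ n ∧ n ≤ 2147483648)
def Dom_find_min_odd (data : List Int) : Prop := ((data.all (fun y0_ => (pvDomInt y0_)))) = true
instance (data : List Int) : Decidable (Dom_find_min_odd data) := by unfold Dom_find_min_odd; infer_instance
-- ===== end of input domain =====

-- B replaces A's two index-driven while loops (append-filter, then a running-minimum scan)
-- with a comprehension filtering the odds and sorted(odds)[0]; same return value, more idiomatic.

-- ===== PORT A =====
def find_min_odd (data : List Int) : Int :=
  -- while c < len(data): if data[c] % 2 == 1: ls.append(data[c])
  let ls := data.foldl (fun acc x => if PySem.Int.mod x 2 = 1 then acc ++ [x] else acc) []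
  -- mi = ls[0]  (IndexError when ls = [], excluded by Pre_)
  let mi0 := PySem.List.pyGetD ls 0 0
  -- while a < len(ls): if mi >= ls[a]: mi = ls[a]
  ls.foldl (fun mi x => if mi ≥ x then x else mi) mi0

-- ===== PORT B =====
def find_min_odd_alt (data : List Int) : Int :=
  let odds := data.filter (fun x => PySem.Int.mod x 2 = 1)
  -- sorted(odds)[0]  (IndexError when odds = [], excluded by Pre_)
  PySem.List.pyGetD (PySem.List.sorted odds (fun x => x) false) 0 0

-- ===== PRECONDITION & SPEC =====
-- Pre_: the list contains at least one odd number (Python's sense: x % 2 == 1);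
-- otherwise both A and B raise IndexError.
def Pre_find_min_odd (data : List Int) : Prop :=
  (data.any (fun x => PySem.Int.mod x 2 = 1)) = true
instance (data : List Int) : Decidable (Pre_find_min_odd data) := by
  unfold Pre_find_min_odd; infer_instance
def pvWitness_find_min_odd : List Int := [4, 7, -3, 2]

def Spec_find_min_odd (data : List Int) (out : Int) : Prop := out = find_min_odd_alt data
instance (data : List Int) (out : Int) : Decidable (Spec_find_min_odd data out) := by
  unfold Spec_find_min_odd; infer_instance

-- ===== CLAIM (what is proved, stated in full; the proofs are below) =====
def Claim_equal_find_min_odd : Prop := ∀ (data : List Int), Dom_find_min_odd data → Pre_find_min_odd data → Spec_find_min_odd data (find_min_odd data)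

-- ===== LEMMAS AND PROOFS =====

-- A's running-minimum update is `min`.
theorem foldl_ge_eq_foldl_min (l : List Int) (m : Int) :
    l.foldl (fun mi x => if mi ≥ x then x else mi) m = l.foldl min m := by
  induction l generalizing m with
  | nil => rfl
  | cons h t ih =>
      simp only [List.foldl_cons, ih]
      congr 1
      rw [min_def]; split_ifs <;> omega

theorem foldl_min_self (h : Int) (t : List Int) :
    (h :: t).foldl min h = t.foldl min h := by
  simp [List.foldl_cons]

-- A computes the minimum of the odd sublist.
theorem findA_min (data : List Int)
    (hne : data.filter (fun x => PySem.Int.mod x 2 = 1) ≠ []) :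
    (data.filter (fun x => PySem.Int.mod x 2 = 1)).min? = some (find_min_odd data) := by
  unfold find_min_odd
  have hfold : data.foldl (fun acc x => if PySem.Int.mod x 2 = 1 then acc ++ [x] else acc) [] =
      data.filter (fun x => PySem.Int.mod x 2 = 1) := by
    simpa using PySem.List.foldl_append_if_eq_filter
      (fun x => decide (PySem.Int.mod x 2 = 1)) data []
  rw [hfold]
  obtain ⟨h, t, hht⟩ := List.exists_cons_of_ne_nil hne
  rw [hht, List.min?_cons', foldl_ge_eq_foldl_min]
  have hget : PySem.List.pyGetD (h :: t) 0 0 = h := by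
    simp [PySem.List.pyGetD]
  rw [hget, foldl_min_self]

-- B also computes the minimum of the odd sublist.
theorem findB_min (data : List Int)
    (hne : data.filter (fun x => PySem.Int.mod x 2 = 1) ≠ []) :
    (data.filter (fun x => PySem.Int.mod x 2 = 1)).min? = some (find_min_odd_alt data) := by
  unfold find_min_odd_alt
  set ls := data.filter (fun x => PySem.Int.mod x 2 = 1) with hls
  have hperm := PySem.List.sorted_perm ls (fun x => x) false
  cases hs : PySem.List.sorted ls (fun x => x) false with
  | nil =>
      rw [hs] at hperm
      exact absurd hperm.symm.eq_nil hne
  | cons m t =>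
      have hmem : m ∈ ls := by
        have hm : m ∈ PySem.List.sorted ls (fun x => x) false := by simp [hs]
        exact (PySem.List.mem_sorted ls (fun x => x) false m).1 hm
      have hle : ∀ y ∈ ls, m ≤ y := fun y hy => by
        simpa using PySem.List.key_head_sorted_le ls (fun x => x) hs y hy
      have hget : PySem.List.pyGetD (m :: t) 0 0 = m := by simp [PySem.List.pyGetD]
      show ls.min? = some (PySem.List.pyGetD (PySem.List.sorted ls (fun x => x) false) 0 0)
      rw [hs, hget]
      exact List.min?_eq_some_iff_subtype.2 ⟨hmem, hle⟩

theorem filter_ne_nil_of_pre (data : List Int) (hp : Pre_find_min_odd data) :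
    data.filter (fun x => PySem.Int.mod x 2 = 1) ≠ [] := by
  unfold Pre_find_min_odd at hp
  rw [List.any_eq_true] at hp
  obtain ⟨x, hx, hodd⟩ := hp
  intro hnil
  have hmem : x ∈ data.filter (fun x => PySem.Int.mod x 2 = 1) :=
    List.mem_filter.2 ⟨hx, hodd⟩
  rw [hnil] at hmem
  simp at hmem

-- ===== VERDICT (by name: the statement is the Claim_ definition above) =====
theorem find_min_odd_spec : Claim_equal_find_min_odd := by
  intro data _ hp
  unfold Spec_find_min_odd
  have hne := filter_ne_nil_of_pre data hp
  have ha := findA_min data hne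
  have hb := findB_min data hne
  rw [ha] at hb
  exact Option.some.inj hb
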